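-- pv_equiv track=rewrite | github.com/DataTalksClub/mlops-zoomcamp | 05-monitoring/taxi_monitor/evidently/Lib/site-packages/litestar/_openapi/datastructures.py | remove_common_prefix
-- ===== SOURCE A (Python) =====
-- def remove_common_prefix(tuples: list[tuple[str, ...]]) -> list[tuple[str, ...]]:
--     """Remove the common prefix from a list of tuples.
--
--     Args:
--         tuples: A list of tuples to remove the common prefix from.
--
--     Returns:
--         A list of tuples with the common prefix removed.
--     """
--
--     def longest_common_prefix(tuples_: list[tuple[str, ...]]) -> tuple[str, ...]:
--         """Find the longest common prefix of a list of tuples.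
--
--         Args:
--             tuples_: A list of tuples to find the longest common prefix of.
--
--         Returns:
--             The longest common prefix of the tuples.
--         """
--         prefix_ = tuples_[0]
--         for t in tuples_:
--             # Compare the current prefix with each tuple and shorten it
--             prefix_ = prefix_[: min(len(prefix_), len(t))]
--             for i in range(len(prefix_)):
--                 if prefix_[i] != t[i]:
--                     prefix_ = prefix_[:i]
--                     break
--         return prefix_
--
--     prefix = longest_common_prefix(tuples)
--     prefix_length = len(prefix)
--     return [t[prefix_length:] for t in tuples]
-- ===== SOURCE B (Python) =====
-- def remove_common_prefix(tuples: list[tuple[str, ...]]) -> list[tuple[str, ...]]: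
--     """Remove the common prefix from a list of tuples (column-major check)."""
--     first = tuples[0]
--     prefix_length = 0
--     for i, val in enumerate(first):
--         if all(i < len(t) and t[i] == val for t in tuples):
--             prefix_length += 1
--         else:
--             break
--     return [t[prefix_length:] for t in tuples]
-- ===== Notes on version B (the rewrite author's own statement) =====
-- stated objective: simpler
-- what changed: Replaces the nested running-prefix-shortening loop (per-tuple truncate + inner mismatch scan) with a single column-major pass: count positions where all tuples agree with tuples[0], then slice.
import Mathlib
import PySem

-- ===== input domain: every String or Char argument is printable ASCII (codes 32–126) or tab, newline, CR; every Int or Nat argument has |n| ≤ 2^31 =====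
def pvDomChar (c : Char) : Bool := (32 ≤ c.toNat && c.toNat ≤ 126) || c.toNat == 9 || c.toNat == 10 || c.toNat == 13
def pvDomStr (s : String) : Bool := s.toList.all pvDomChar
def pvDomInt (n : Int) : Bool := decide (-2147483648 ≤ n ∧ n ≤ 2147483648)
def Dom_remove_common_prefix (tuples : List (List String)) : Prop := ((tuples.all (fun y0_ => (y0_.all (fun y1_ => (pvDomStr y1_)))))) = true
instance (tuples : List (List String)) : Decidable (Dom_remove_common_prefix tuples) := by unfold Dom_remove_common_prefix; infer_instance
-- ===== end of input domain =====

-- B replaces A's nested running-prefix-shortening loop by one column-major count of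
-- agreeing positions (simpler decomposition, same cost). Equivalence on non-empty input
-- (both raise IndexError on []).

-- ===== PORT A =====
-- inner 'for i in range(len(prefix_)) … break' loop of longest_common_prefix:
-- fuel counts the remaining iterations (p.length - i); p.getD i "" is Python p[i],
-- always in range at every reached i.
def pvGoA (p t : List String) (i : Nat) : Nat → List String
  | 0 => p
  | fuel + 1 =>
    if (p.getD i "") ≠ (t.getD i "") then p.take i else pvGoA p t (i + 1) fuel

-- one iteration of the outer 'for t in tuples_' loop
def pvStepA (p t : List String) : List String :=
  let p' := p.take (min p.length t.length)   -- prefix_ = prefix_[: min(len(prefix_), len(t))]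
  pvGoA p' t 0 p'.length

def remove_common_prefix (tuples : List (List String)) : List (List String) :=
  -- prefix_ = tuples_[0]  (Python raises IndexError on []; excluded by Pre_)
  let prefix_ := tuples.foldl pvStepA (tuples.headD [])
  let prefix_length := prefix_.length
  tuples.map (fun t => t.drop prefix_length)   -- t[prefix_length:] with nonneg index = drop

-- ===== PORT B =====
-- all(i < len(t) and t[i] == val for t in tuples)
def pvColOk (tuples : List (List String)) (i : Nat) (val : String) : Bool :=
  tuples.all (fun t => decide (i < t.length) && (t.getD i "" == val))

-- 'for i, val in enumerate(first): … prefix_length += 1 / break' as structural recursion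
def pvCountB (tuples : List (List String)) (i : Nat) : List String → Nat
  | [] => 0
  | val :: rest =>
    if pvColOk tuples i val then pvCountB tuples (i + 1) rest + 1 else 0

def remove_common_prefix_alt (tuples : List (List String)) : List (List String) :=
  let first := tuples.headD []   -- tuples[0]; Python raises IndexError on [] (excluded by Pre_)
  let prefix_length := pvCountB tuples 0 first
  tuples.map (fun t => t.drop prefix_length)

-- ===== PRECONDITION & SPEC =====
-- Pre_ excludes only the empty list, on which A (tuples_[0]) raises IndexError.
def Pre_remove_common_prefix (tuples : List (List String)) : Prop := tuples ≠ []
instance (tuples : List (List String)) : Decidable (Pre_remove_common_prefix tuples) := by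
  unfold Pre_remove_common_prefix; infer_instance

def pvWitness_remove_common_prefix : List (List String) := [["a", "b"], ["a", "c"]]

def Spec_remove_common_prefix (tuples : List (List String)) (out : List (List String)) : Prop :=
  out = remove_common_prefix_alt tuples
instance (tuples : List (List String)) (out : List (List String)) :
    Decidable (Spec_remove_common_prefix tuples out) := by
  unfold Spec_remove_common_prefix; infer_instance

-- ===== CLAIM (what is proved, stated in full; the proofs are below) =====
def Claim_equal_remove_common_prefix : Prop :=
  ∀ (tuples : List (List String)), Dom_remove_common_prefix tuples →
    Pre_remove_common_prefix tuples →
    Spec_remove_common_prefix tuples (remove_common_prefix tuples)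

-- ===== LEMMAS AND PROOFS =====

-- longest common prefix of two lists (proof-side reference function)
def pvLcp : List String → List String → List String
  | a :: as, b :: bs => if a = b then a :: pvLcp as bs else []
  | _, _ => []

theorem pvLcp_nil_right : ∀ p : List String, pvLcp p [] = [] := by
  intro p; cases p <;> rfl

theorem pvLcp_self : ∀ p : List String, pvLcp p p = p := by
  intro p; induction p with
  | nil => rfl
  | cons a as ih => simp [pvLcp, ih]

theorem pvLcp_take_min : ∀ p t : List String,
    pvLcp (p.take (min p.length t.length)) t = pvLcp p t := by
  intro p
  induction p with
  | nil => intro t; simp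
  | cons a as ih =>
    intro t
    cases t with
    | nil => simp [pvLcp_nil_right]
    | cons b bs =>
      simp only [List.length_cons, Nat.succ_min_succ, List.take_succ_cons, pvLcp]
      rw [ih bs]

-- pvGoA computes: keep the already-scanned part, extend by the lcp of the rest
theorem pvGoA_spec : ∀ (fuel : Nat) (p t : List String) (i : Nat),
    i + fuel = p.length → p.length ≤ t.length →
    pvGoA p t i fuel = p.take i ++ pvLcp (p.drop i) (t.drop i) := by
  intro fuel
  induction fuel with
  | zero =>
    intro p t i hi _
    have : i = p.length := by omega
    subst this
    simp [pvGoA, pvLcp]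
  | succ fuel ih =>
    intro p t i hi hlen
    have hip : i < p.length := by omega
    have hit : i < t.length := by omega
    have hpd : p.drop i = p[i] :: p.drop (i + 1) := List.drop_eq_getElem_cons hip
    have htd : t.drop i = t[i] :: t.drop (i + 1) := List.drop_eq_getElem_cons hit
    simp only [pvGoA, List.getD_eq_getElem _ _ hip, List.getD_eq_getElem _ _ hit]
    rw [hpd, htd]
    by_cases h : p[i] = t[i]
    · rw [if_neg (by simp [h]), ih p t (i + 1) (by omega) hlen]
      simp [pvLcp, h, List.take_succ, List.getElem?_eq_getElem hip]
    · rw [if_pos h]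
      simp [pvLcp, h]

theorem pvStepA_eq_lcp : pvStepA = pvLcp := by
  funext p t
  unfold pvStepA
  rw [pvGoA_spec _ _ _ 0 (by simp) (by simp)]
  simpa using pvLcp_take_min p t

-- index-free column recursion (proof-side): pvCountB with the heads dropped
def pvColOk' (cols : List (List String)) (val : String) : Bool :=
  cols.all (fun t => decide (0 < t.length) && (t.getD 0 "" == val))

def pvCount' (cols : List (List String)) : List String → Nat
  | [] => 0
  | val :: rest =>
    if pvColOk' cols val then pvCount' (cols.map List.tail) rest + 1 else 0

theorem pvColOk_eq : ∀ (ts : List (List String)) (i : Nat) (v : String),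
    pvColOk ts i v = pvColOk' (ts.map (List.drop i)) v := by
  intro ts i v
  induction ts with
  | nil => rfl
  | cons t ts ih =>
    simp only [pvColOk, pvColOk', List.map_cons, List.all_cons] at *
    rw [← ih]
    congr 1
    by_cases h : i < t.length
    · have h0 : 0 < (t.drop i).length := by simp; omega
      have hg : (t.drop i).getD 0 "" = t.getD i "" := by
        rw [List.getD_eq_getElem _ _ h0, List.getD_eq_getElem _ _ h]
        simp
      simp [h, h0, hg]
    · have h0 : ¬ 0 < (t.drop i).length := by simp; omega
      simp [h, h0]

theorem pvCountB_eq : ∀ (vs : List String) (ts : List (List String)) (i : Nat),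
    pvCountB ts i vs = pvCount' (ts.map (List.drop i)) vs := by
  intro vs
  induction vs with
  | nil => intro ts i; rfl
  | cons v vs ih =>
    intro ts i
    simp only [pvCountB, pvCount', pvColOk_eq]
    have hmap : (ts.map (List.drop i)).map List.tail = ts.map (List.drop (i + 1)) := by
      simp only [List.map_map]
      apply List.map_congr_left
      intro t _
      simp [Function.comp, List.tail_drop]
    rw [hmap, ih ts (i + 1)]

theorem pvCount'_cons : ∀ (vs t : List String) (cols : List (List String)),
    pvCount' (t :: cols) vs = pvCount' cols (pvLcp vs t) := by
  intro vs
  induction vs with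
  | nil => intro t cols; simp [pvLcp]; cases t <;> rfl
  | cons v vs ih =>
    intro t cols
    cases t with
    | nil =>
      simp [pvCount', pvColOk', pvLcp]
    | cons x xs =>
      by_cases h : v = x
      · subst h
        have hcond : pvColOk' ((v :: xs) :: cols) v = pvColOk' cols v := by
          simp [pvColOk', List.getD]
        rw [show pvLcp (v :: vs) (v :: xs) = v :: pvLcp vs xs from by simp [pvLcp]]
        simp only [pvCount', hcond, List.map_cons, List.tail_cons]
        by_cases hall : pvColOk' cols v = true
        · rw [if_pos hall, if_pos hall, ih]
        · rw [if_neg hall, if_neg hall]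
      · have hx : (x == v) = false := beq_eq_false_iff_ne.mpr (fun hx => h hx.symm)
        have hcond : pvColOk' ((x :: xs) :: cols) v = false := by
          simp [pvColOk', List.getD, hx]
        rw [show pvLcp (v :: vs) (x :: xs) = [] from by simp [pvLcp, h]]
        simp [pvCount', hcond]

theorem pvCount'_nil : ∀ vs : List String, pvCount' [] vs = vs.length := by
  intro vs
  induction vs with
  | nil => rfl
  | cons v vs ih => simp [pvCount', pvColOk', ih]

theorem pvCount'_foldl : ∀ (cols : List (List String)) (vs : List String),
    pvCount' cols vs = (cols.foldl pvLcp vs).length := by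
  intro cols
  induction cols with
  | nil => intro vs; simp [pvCount'_nil]
  | cons t cols ih => intro vs; rw [pvCount'_cons, ih, List.foldl_cons]

-- ===== VERDICT (by name: the statement is the Claim_ definition above) =====
theorem remove_common_prefix_spec : Claim_equal_remove_common_prefix := by
  intro tuples _ hpre
  unfold Spec_remove_common_prefix remove_common_prefix remove_common_prefix_alt
  cases tuples with
  | nil => exact absurd rfl hpre
  | cons h ts =>
    have hdrop0 : ∀ l : List (List String), l.map (List.drop 0) = l := by
      intro l; induction l with
      | nil => rfl
      | cons a l ih => simp [ih]
    have hA : ((h :: ts).foldl pvStepA ((h :: ts).headD [])).length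
        = (ts.foldl pvLcp h).length := by
      rw [pvStepA_eq_lcp]
      simp [pvLcp_self]
    have hB : pvCountB (h :: ts) 0 ((h :: ts).headD []) = (ts.foldl pvLcp h).length := by
      rw [List.headD_cons, pvCountB_eq, hdrop0, pvCount'_cons, pvLcp_self, pvCount'_foldl]
    simp only [hA, hB]
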